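-- pv_equiv track=rewrite | github.com/oblasko/prostate-classification | week_06/classify_concated_images.py | split_images_by_patient
-- ===== SOURCE A (Python) =====
-- def getPatientId(filename):
--     split_filename = filename.split('_')
--     return split_filename[1]
--
-- def split_images_by_patient(imgs, masks, flnames):
--     indexes_by_patient = {}
--     for i in range(len(imgs)):
--         patient_id = getPatientId(flnames[i])
--         if patient_id in indexes_by_patient:
--             indexes_by_patient[patient_id].append((i, flnames[i]))
--         else:
--             indexes_by_patient[patient_id] = [(i, flnames[i])]
--     return indexes_by_patient
-- ===== SOURCE B (Python) =====
-- def getPatientId(filename):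
--     split_filename = filename.split('_')
--     return split_filename[1]
--
-- def split_images_by_patient(imgs, masks, flnames):
--     n = len(imgs)
--     keys = [getPatientId(flnames[i]) for i in range(n)]
--     order = list(dict.fromkeys(keys))
--     return {k: [(i, flnames[i]) for i in range(n) if keys[i] == k]
--             for k in order}
-- ===== Notes on version B (the rewrite author's own statement) =====
-- stated objective: alternative
-- what changed: Replace the incremental append-or-create dictionary build with a two-pass strategy: precompute the key of every index, take the ordered deduplication of the keys, and build each patient's group by a separate scan of the index range.
import Mathlib
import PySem

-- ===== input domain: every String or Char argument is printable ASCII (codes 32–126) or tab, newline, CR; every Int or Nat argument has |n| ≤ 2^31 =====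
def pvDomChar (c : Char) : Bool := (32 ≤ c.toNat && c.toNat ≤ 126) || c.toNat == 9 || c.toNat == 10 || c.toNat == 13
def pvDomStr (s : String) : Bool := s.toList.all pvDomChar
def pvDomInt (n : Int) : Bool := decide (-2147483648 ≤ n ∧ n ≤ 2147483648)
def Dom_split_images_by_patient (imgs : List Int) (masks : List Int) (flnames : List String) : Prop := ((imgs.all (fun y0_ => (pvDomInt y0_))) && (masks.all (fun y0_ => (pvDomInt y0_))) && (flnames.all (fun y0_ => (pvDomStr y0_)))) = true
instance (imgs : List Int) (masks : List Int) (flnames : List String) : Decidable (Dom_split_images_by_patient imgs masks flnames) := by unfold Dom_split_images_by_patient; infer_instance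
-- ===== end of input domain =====

-- ===== PORT A =====
-- B changes the decomposition only (two-pass grouping instead of an incremental dict build); objective: alternative, same results.
-- helper getPatientId: filename.split('_')[1]; the .getD fallbacks are reached only outside Pre_ (where Python raises IndexError).
def pvGetPatientId (filename : String) : String :=
  (PySem.List.pyGet? ((PySem.Str.split? filename "_").getD []) 1).getD ""

def split_images_by_patient (imgs : List Int) (masks : List Int) (flnames : List String) : List (String × List (Int × String)) :=
  ((PySem.List.pyRange 0 (imgs.length : Int) 1).foldl
    (fun (d : PySem.Dict String (List (Int × String))) i =>
      let fname := (PySem.List.pyGet? flnames i).getD ""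
      let patient_id := pvGetPatientId fname
      if d.contains patient_id then
        d.modify patient_id [] (fun l => l ++ [(i, fname)])
      else
        d.insert patient_id [(i, fname)])
    PySem.Dict.empty).items

-- ===== PORT B =====
def split_images_by_patient_alt (imgs : List Int) (masks : List Int) (flnames : List String) : List (String × List (Int × String)) :=
  let n : Int := (imgs.length : Int)
  let keys := (PySem.List.pyRange 0 n 1).map
    (fun i => pvGetPatientId ((PySem.List.pyGet? flnames i).getD ""))
  let order := PySem.List.dedup keys
  order.map (fun k =>
    (k, ((PySem.List.pyRange 0 n 1).filter
          (fun i => PySem.List.pyGetD keys i "" == k)).map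
        (fun i => (i, (PySem.List.pyGet? flnames i).getD ""))))

-- ===== PRECONDITION & SPEC =====
-- Pre_: exactly where Python A returns — every filename actually indexed (the first len(imgs) of flnames,
-- so len(flnames) ≥ len(imgs)) must split on '_' into at least two pieces, else split('_')[1] raises IndexError.
def Pre_split_images_by_patient (imgs : List Int) (masks : List Int) (flnames : List String) : Prop :=
  imgs.length ≤ flnames.length ∧
  ∀ f ∈ flnames.take imgs.length, 2 ≤ ((PySem.Str.split? f "_").getD []).length
instance (imgs : List Int) (masks : List Int) (flnames : List String) : Decidable (Pre_split_images_by_patient imgs masks flnames) := by unfold Pre_split_images_by_patient; infer_instance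
def pvWitness_split_images_by_patient : List Int × List Int × List String :=
  ([10, 20, 30], [1, 2, 3], ["img_p1_a", "img_p2_b", "img_p1_c"])

def Spec_split_images_by_patient (imgs : List Int) (masks : List Int) (flnames : List String) (out : List (String × List (Int × String))) : Prop := out = split_images_by_patient_alt imgs masks flnames
instance (imgs : List Int) (masks : List Int) (flnames : List String) (out : List (String × List (Int × String))) : Decidable (Spec_split_images_by_patient imgs masks flnames out) := by unfold Spec_split_images_by_patient; infer_instance

-- ===== CLAIM (what is proved, stated in full; the proofs are below) =====
def Claim_equal_split_images_by_patient : Prop := ∀ (imgs : List Int) (masks : List Int) (flnames : List String), Dom_split_images_by_patient imgs masks flnames → Pre_split_images_by_patient imgs masks flnames → Spec_split_images_by_patient imgs masks flnames (split_images_by_patient imgs masks flnames)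

-- ===== LEMMAS AND PROOFS =====

-- the incremental dict build over range(0, m), for generic key/value-name functions K F
def pvStep (K F : Int → String) (d : PySem.Dict String (List (Int × String))) (i : Int) :
    PySem.Dict String (List (Int × String)) :=
  if d.contains (K i) then d.modify (K i) [] (fun l => l ++ [(i, F i)])
  else d.insert (K i) [(i, F i)]

-- the grouped description of that dict
def pvGroups (K F : Int → String) (m : Nat) : List (String × List (Int × String)) :=
  (PySem.List.dedup ((PySem.List.pyRange 0 (m : Int) 1).map K)).map
    (fun k => (k, ((PySem.List.pyRange 0 (m : Int) 1).filter (fun i => K i == k)).map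
        (fun i => (i, F i))))

lemma pv_find?_map_pair (keys : List String) (v : String → List (Int × String)) (k0 : String)
    (h : k0 ∈ keys) :
    List.find? (fun p => p.1 == k0) (keys.map (fun k => (k, v k))) = some (k0, v k0) := by
  induction keys with
  | nil => cases h
  | cons a rest ih =>
    by_cases hak : a = k0
    · subst hak
      simp
    · have h' : k0 ∈ rest := by
        cases h with
        | head => exact absurd rfl hak
        | tail _ h' => exact h'
      simpa [List.find?, hak] using ih h'

lemma pvFold_eq_groups (K F : Int → String) (m : Nat) :
    ((PySem.List.pyRange 0 (m : Int) 1).foldl (pvStep K F) PySem.Dict.empty).items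
      = pvGroups K F m := by
  induction m with
  | zero =>
    simp [pvGroups, PySem.List.pyRange_one_eq_nil (le_refl (0:Int)), PySem.Dict.empty,
      PySem.List.dedup, PySem.Set.ofList]
  | succ m ih =>
    have hcast : ((m + 1 : Nat) : Int) = (m : Int) + 1 := by push_cast; ring
    have hsplit : PySem.List.pyRange 0 ((m + 1 : Nat) : Int) 1
        = PySem.List.pyRange 0 (m : Int) 1 ++ [(m : Int)] := by
      rw [hcast, PySem.List.pyRange_one_succ_right (by positivity)]
    set R := PySem.List.pyRange 0 (m : Int) 1 with hR
    set keys := PySem.List.dedup (R.map K) with hkeys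
    set v : String → List (Int × String) :=
      fun k => (R.filter (fun i => K i == k)).map (fun i => (i, F i)) with hv
    have hG : pvGroups K F m = keys.map (fun k => (k, v k)) := rfl
    have hD : (R.foldl (pvStep K F) PySem.Dict.empty)
        = PySem.Dict.mk (keys.map (fun k => (k, v k))) := PySem.Dict.ext (hG ▸ ih)
    have hmemkeys : K (m : Int) ∈ keys ↔ K (m : Int) ∈ R.map K := by
      simp [hkeys]
    have hc : (PySem.Dict.mk (keys.map (fun k => (k, v k)))).contains (K (m : Int)) = true
        ↔ K (m : Int) ∈ keys := by
      simp [PySem.Dict.contains, List.any_map, Function.comp_def, List.any_eq_true]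
    have hnewkeys : PySem.List.dedup ((R ++ [(m : Int)]).map K)
        = if keys.contains (K (m : Int)) then keys else keys ++ [K (m : Int)] := by
      simp only [List.map_append, List.map_cons, List.map_nil, hkeys,
        PySem.List.dedup, PySem.Set.ofList_append_singleton]
      simp [PySem.Set.add, PySem.Set.contains]
    have hfilter : (fun k => (k, ((R ++ [(m : Int)]).filter (fun i => K i == k)).map
          (fun i => (i, F i))))
        = fun k => (k, v k ++ (if K (m : Int) == k then [((m : Int), F (m : Int))] else [])) := by
      funext k
      rw [List.filter_append, List.map_append, hv]
      by_cases h : K (m : Int) == k <;> simp [List.filter, h]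
    rw [hsplit, List.foldl_append, hD]
    simp only [List.foldl_cons, List.foldl_nil]
    unfold pvGroups
    rw [hsplit, hnewkeys, hfilter]
    by_cases hmem : K (m : Int) ∈ keys
    · -- the key is already present: modify appends to the existing group
      have hct : keys.contains (K (m : Int)) = true := by
        simpa using hmem
      have hdc := hc.mpr hmem
      unfold pvStep PySem.Dict.modify
      rw [if_pos hdc]
      have hgd : (PySem.Dict.mk (keys.map (fun k => (k, v k)))).getD (K (m : Int)) []
          = v (K (m : Int)) := by
        simp [PySem.Dict.getD, PySem.Dict.get?, pv_find?_map_pair keys v _ hmem]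
      rw [hgd]
      simp only [PySem.Dict.insert, hdc, if_pos, hct, List.map_map]
      apply List.map_congr_left
      intro k _
      by_cases hkk : k = K (m : Int)
      · subst hkk; simp
      · have h1 : (k == K (m : Int)) = false := by simp [hkk]
        have h2 : (K (m : Int) == k) = false := by simp [Ne.symm hkk]
        simp [Function.comp_def, h1, h2]
        exact fun h => absurd h hkk
    · -- a new key: insert appends a fresh singleton group
      have hct : keys.contains (K (m : Int)) = false := by
        simpa using hmem
      have hdc : (PySem.Dict.mk (keys.map (fun k => (k, v k)))).contains (K (m : Int)) = false := by
        rw [← Bool.not_eq_true]; exact fun h => hmem (hc.mp h)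
      unfold pvStep
      rw [if_neg (by simp [hdc])]
      simp only [PySem.Dict.insert, hdc, Bool.false_eq_true, if_false, PySem.Dict.items,
        hct, List.map_append, List.map_cons, List.map_nil]
      have hvempty : v (K (m : Int)) = [] := by
        rw [hv]
        have : R.filter (fun i => K i == (K (m : Int))) = [] := by
          rw [List.filter_eq_nil_iff]
          intro i hi hbeq
          exact (hmemkeys.not.mp hmem) (List.mem_map.mpr ⟨i, hi, eq_of_beq hbeq⟩)
        simp [this]
      congr 1
      · apply List.map_congr_left
        intro k hk
        have h2 : (K (m : Int) == k) = false := by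
          simp only [beq_eq_false_iff_ne, ne_eq]
          intro h; exact hmem (h ▸ hk)
        simp [h2]
      · simp [hvempty]

theorem pv_main (imgs : List Int) (masks : List Int) (flnames : List String) :
    split_images_by_patient imgs masks flnames = split_images_by_patient_alt imgs masks flnames := by
  set K : Int → String := fun i => pvGetPatientId ((PySem.List.pyGet? flnames i).getD "") with hK
  set F : Int → String := fun i => (PySem.List.pyGet? flnames i).getD "" with hF
  have hA : split_images_by_patient imgs masks flnames
      = ((PySem.List.pyRange 0 (imgs.length : Int) 1).foldl (pvStep K F) PySem.Dict.empty).items := rfl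
  rw [hA, pvFold_eq_groups K F imgs.length]
  show pvGroups K F imgs.length
      = (PySem.List.dedup ((PySem.List.pyRange 0 (imgs.length : Int) 1).map K)).map (fun k =>
          (k, ((PySem.List.pyRange 0 (imgs.length : Int) 1).filter
            (fun i => PySem.List.pyGetD ((PySem.List.pyRange 0 (imgs.length : Int) 1).map K) i "" == k)).map
              (fun i => (i, F i))))
  unfold pvGroups
  apply List.map_congr_left
  intro k _
  congr 1
  congr 1
  apply List.filter_congr
  intro i hi
  have hb := (PySem.List.mem_pyRange_one).mp hi
  rw [PySem.List.pyGetD_map_pyRange_of_nonneg K (imgs.length : Int) i "" hb.1 hb.2]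

-- ===== VERDICT (by name: the statement is the Claim_ definition above) =====
theorem split_images_by_patient_spec : Claim_equal_split_images_by_patient := by
  intro imgs masks flnames _ _
  exact pv_main imgs masks flnames
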